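-- pv_equiv track=rewrite | github.com/paradojin/Proyecto-Opti | p2/cob (otra ver).py | obtener_restricciones
-- ===== SOURCE A (Python) =====
-- def obtener_restricciones(zonas, diccionario):
--
--     restricciones=[]
--
--     for reg in zonas:
--         antenaza=""
--         for clave in diccionario:
--             if reg in diccionario[clave]:
--                 antenaza=antenaza+clave+" + "
--         antenaza= antenaza[0:-2]
--         antenaza= antenaza+">= 1"
--         restricciones.append(antenaza)
--
--     return restricciones
-- ===== SOURCE B (Python) =====
-- def obtener_restricciones(zonas, diccionario):
--     # one pass over the dictionary: inverted index region -> antenna keys covering it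
--     cobertura = {}
--     for clave, regiones in diccionario.items():
--         for reg in dict.fromkeys(regiones):
--             cobertura.setdefault(reg, []).append(clave)
--     restricciones = []
--     for reg in zonas:
--         claves = cobertura.get(reg, [])
--         if claves:
--             restricciones.append(" + ".join(claves) + " >= 1")
--         else:
--             restricciones.append(">= 1")
--     return restricciones
-- ===== Notes on version B (the rewrite author's own statement) =====
-- stated objective: faster
-- what changed: B builds an inverted index region->covering-keys in a single pass over the dictionary and then emits each constraint string by joining the indexed keys, instead of A's rescan of every dictionary entry (with a list membership test) for every region.
import Mathlib
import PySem

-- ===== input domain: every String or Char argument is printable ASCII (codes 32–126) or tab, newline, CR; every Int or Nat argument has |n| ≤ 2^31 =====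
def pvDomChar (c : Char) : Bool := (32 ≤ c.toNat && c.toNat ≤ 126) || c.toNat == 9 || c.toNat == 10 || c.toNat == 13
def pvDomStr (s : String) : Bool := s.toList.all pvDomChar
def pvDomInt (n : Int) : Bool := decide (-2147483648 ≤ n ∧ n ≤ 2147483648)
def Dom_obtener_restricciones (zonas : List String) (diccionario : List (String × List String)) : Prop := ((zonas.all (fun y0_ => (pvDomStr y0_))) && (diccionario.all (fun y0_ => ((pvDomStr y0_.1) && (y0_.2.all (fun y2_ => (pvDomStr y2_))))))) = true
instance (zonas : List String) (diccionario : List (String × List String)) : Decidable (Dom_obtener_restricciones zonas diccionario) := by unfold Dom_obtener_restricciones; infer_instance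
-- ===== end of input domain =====

-- B replaces A's rescan of the whole dictionary per region by one inverted index
-- (region -> covering keys) built in a single pass, then emits each constraint string.

-- ===== PORT A =====
def obtener_restricciones (zonas : List String) (diccionario : List (String × List String)) : List String :=
  let d := PySem.Dict.ofList diccionario
  zonas.foldl (fun restricciones reg =>
    let antenaza : List Char :=
      d.keys.foldl (fun acc clave =>
        if reg ∈ d.getD clave [] then acc ++ (clave.toList ++ (" + ").toList) else acc) []
    let antenaza := PySem.List.slice antenaza (some 0) (some (-2))
    let antenaza := antenaza ++ (">= 1").toList
    restricciones ++ [String.ofList antenaza]) []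

-- ===== PORT B =====
def obtener_restricciones_alt (zonas : List String) (diccionario : List (String × List String)) : List String :=
  let d := PySem.Dict.ofList diccionario
  let cobertura : PySem.Dict String (List String) :=
    d.items.foldl (fun cob p =>
      (PySem.List.dedup p.2).foldl (fun cob reg => cob.modify reg ([] : List String) (· ++ [p.1])) cob)
      PySem.Dict.empty
  zonas.foldl (fun restricciones reg =>
    let claves := cobertura.getD reg []
    if claves.isEmpty then restricciones ++ [">= 1"]
    else restricciones ++
      [String.ofList (PySem.Chars.join ((" + ").toList) (claves.map String.toList) ++ (" >= 1").toList)]) []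

-- ===== PRECONDITION & SPEC =====
def Spec_obtener_restricciones (zonas : List String) (diccionario : List (String × List String)) (out : List String) : Prop := out = obtener_restricciones_alt zonas diccionario
instance (zonas : List String) (diccionario : List (String × List String)) (out : List String) : Decidable (Spec_obtener_restricciones zonas diccionario out) := by unfold Spec_obtener_restricciones; infer_instance

-- ===== CLAIM (what is proved, stated in full; the proofs are below) =====
def Claim_equal_obtener_restricciones : Prop := ∀ (zonas : List String) (diccionario : List (String × List String)), Dom_obtener_restricciones zonas diccionario → Spec_obtener_restricciones zonas diccionario (obtener_restricciones zonas diccionario)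

-- ===== LEMMAS AND PROOFS =====

-- inner fold of B: appending k under each occurrence of reg
theorem pv_modfold (rs : List String) (k reg : String) (idx : PySem.Dict String (List String)) :
    ((rs.foldl (fun c r => c.modify r ([] : List String) (· ++ [k])) idx).getD reg []) =
      idx.getD reg [] ++ List.replicate (rs.count reg) k := by
  induction rs generalizing idx with
  | nil => simp
  | cons r rs ih =>
    simp only [List.foldl_cons, ih, List.count_cons, PySem.Dict.getD_modify]
    have hrep : k :: List.replicate (rs.count reg) k = List.replicate (rs.count reg) k ++ [k] := by
      rw [← List.replicate_succ, List.replicate_succ']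
    by_cases h : reg = r
    · subst h
      simp [hrep, List.replicate_succ']
    · have h' : r ≠ reg := fun hh => h hh.symm
      simp [h, h']

theorem pv_count_dedup {α : Type} [DecidableEq α] (v : List α) (x : α) :
    (PySem.List.dedup v).count x = if x ∈ v then 1 else 0 := by
  by_cases h : x ∈ v
  · simp only [h, if_true]
    exact List.count_eq_one_of_mem (PySem.List.nodup_dedup v) ((PySem.List.mem_dedup _ _).2 h)
  · simp only [h, if_false]
    exact List.count_eq_zero_of_not_mem (fun hc => h ((PySem.List.mem_dedup _ _).1 hc))

-- outer fold of B: the inverted index lists exactly the keys whose value contains reg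
theorem pv_index (l : List (String × List String)) (reg : String)
    (idx : PySem.Dict String (List String)) :
    ((l.foldl (fun cob p =>
        (PySem.List.dedup p.2).foldl (fun cob r => cob.modify r ([] : List String) (· ++ [p.1])) cob)
      idx).getD reg []) =
      idx.getD reg [] ++ (l.filter (fun p => decide (reg ∈ p.2))).map (·.1) := by
  induction l generalizing idx with
  | nil => simp
  | cons p l ih =>
    simp only [List.foldl_cons, ih, pv_modfold, pv_count_dedup, List.filter_cons]
    by_cases h : reg ∈ p.2 <;> simp [h]

-- generic loop shape of A's string accumulation
theorem pv_foldl_if_flatten {α : Type} (l : List α) (c : α → Bool) (g : α → List Char) (a : List Char) :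
    l.foldl (fun acc x => if c x then acc ++ g x else acc) a = a ++ ((l.filter c).map g).flatten := by
  induction l generalizing a with
  | nil => simp
  | cons x l ih =>
    simp only [List.foldl_cons, List.filter_cons]
    by_cases h : c x <;> simp [h, ih]

theorem pv_flatten_join (ks : List String) (h : ks ≠ []) :
    ((ks.map (fun k => k.toList ++ (" + ").toList)).flatten) =
      PySem.Chars.join ((" + ").toList) (ks.map String.toList) ++ (" + ").toList := by
  induction ks with
  | nil => simp at h
  | cons k ks ih =>
    cases ks with
    | nil => simp [PySem.Chars.join_singleton]
    | cons k2 ks2 =>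
      rw [List.map_cons, List.flatten_cons, ih (by simp)]
      simp only [List.map_cons]
      rw [PySem.Chars.join_cons_cons]
      simp

-- trimming "X + " to "X " and appending ">= 1"
theorem pv_trim (J : List Char) :
    PySem.List.slice (J ++ (" + ").toList) (some 0) (some (-2)) ++ (">= 1").toList =
      J ++ (" >= 1").toList := by
  have h2 : PySem.List.slice (J ++ (" + ").toList) none (some (-2)) =
      (J ++ (" + ").toList).take ((J ++ (" + ").toList).length - 2) :=
    PySem.List.slice_to_neg_ofNat _ 2 (by omega)
  simp only [PySem.List.slice_zero_start, h2]
  have hlen : (J ++ (" + ").toList).length - 2 = J.length + 1 := by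
    simp [List.length_append]
  rw [hlen, List.take_length_add_append]
  simp

-- one region: A's inner loop + slice equals B's join of indexed keys
theorem pv_one (reg : String) (diccionario : List (String × List String)) :
    String.ofList (PySem.List.slice
        ((PySem.Dict.ofList diccionario).keys.foldl (fun acc clave =>
          if reg ∈ (PySem.Dict.ofList diccionario).getD clave [] then acc ++ (clave.toList ++ (" + ").toList) else acc) [])
        (some 0) (some (-2)) ++ (">= 1").toList) =
    (if (((PySem.Dict.ofList diccionario).items.filter (fun p => decide (reg ∈ p.2))).map (·.1)).isEmpty then (">= 1" : String)
     else String.ofList (PySem.Chars.join ((" + ").toList)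
        ((((PySem.Dict.ofList diccionario).items.filter (fun p => decide (reg ∈ p.2))).map (·.1)).map String.toList) ++ (" >= 1").toList)) := by
  set d := PySem.Dict.ofList diccionario with hd
  have hnodup : d.keys.Nodup := PySem.Dict.nodup_keys_ofList diccionario
  have hkeys : d.keys = d.items.map (·.1) := rfl
  have hstep : d.keys.foldl (fun acc clave =>
        if reg ∈ d.getD clave [] then acc ++ (clave.toList ++ (" + ").toList) else acc) [] =
      d.items.foldl (fun acc p =>
        if decide (reg ∈ p.2) then acc ++ (p.1.toList ++ (" + ").toList) else acc) [] := by
    rw [hkeys, List.foldl_map]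
    refine PySem.List.foldl_congr_mem _ _ _ _ (fun acc p hp => ?_)
    obtain ⟨k, v⟩ := p
    rw [PySem.Dict.getD_of_mem_items d hp hnodup]
    simp
  rw [hstep, pv_foldl_if_flatten]
  set claves := (d.items.filter (fun p => decide (reg ∈ p.2))).map (·.1) with hc
  by_cases h : claves.isEmpty
  · have hfil : d.items.filter (fun p => decide (reg ∈ p.2)) = [] :=
      List.map_eq_nil_iff.1 (List.isEmpty_iff.1 h)
    simp [hfil, h, PySem.List.slice]
  · have hne : claves ≠ [] := fun hh => h (by simp [hh])
    have key : ((d.items.filter (fun p => decide (reg ∈ p.2))).map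
        (fun p => p.1.toList ++ (" + ").toList)).flatten =
        (claves.map (fun k => k.toList ++ (" + ").toList)).flatten := by
      rw [hc, List.map_map]
      rfl
    rw [List.nil_append, key, pv_flatten_join claves hne, pv_trim, if_neg h]

-- push the per-iteration append out of B's branch
theorem pv_if_push {β : Type} (c : Bool) (acc : List β) (a b : β) :
    (if c then acc ++ [a] else acc ++ [b]) = acc ++ [if c then a else b] := by
  cases c <;> simp

-- ===== VERDICT (by name: the statement is the Claim_ definition above) =====
theorem obtener_restricciones_spec : Claim_equal_obtener_restricciones := by
  intro zonas diccionario _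
  unfold Spec_obtener_restricciones
  simp only [obtener_restricciones, obtener_restricciones_alt]
  rw [PySem.List.foldl_append_singleton_eq_map]
  simp only [pv_if_push]
  rw [PySem.List.foldl_append_singleton_eq_map]
  refine List.map_congr_left (fun reg _ => ?_)
  have hcov : ((PySem.Dict.ofList diccionario).items.foldl (fun cob p =>
      (PySem.List.dedup p.2).foldl (fun cob r => cob.modify r ([] : List String) (· ++ [p.1])) cob)
      PySem.Dict.empty).getD reg [] =
      (((PySem.Dict.ofList diccionario).items.filter (fun p => decide (reg ∈ p.2))).map (·.1)) := by
    rw [pv_index]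
    simp
  rw [hcov]
  exact pv_one reg diccionario
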